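-- pv_equiv track=rewrite | github.com/Rayality/python_practice | problems/a_hard_set.py | class_calculate_plays
-- ===== SOURCE A (Python) =====
-- class SlotMachine:
--     def __init__(self, num_for_payout, payout_ammount):
--         self.total_plays = 0
--         self.plays = 0
--         self.payout = num_for_payout
--         self.payout_ammount = payout_ammount
--
--     def play_routine(self, quarters):
--         if quarters > 0:
--             quarters -= 1
--             self.plays += 1
--             self.total_plays += 1
--             if self.plays == self.payout:
--                 self.plays = 0
--                 quarters += self.payout_ammount
--         return quarters
--
-- def class_calculate_plays(num_quarters):
--     first = SlotMachine(27, 20)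
--     second = SlotMachine(100, 50)
--     third = SlotMachine(8, 7)
--     kens_quarters = num_quarters
--     while kens_quarters > 0:
--         kens_quarters = first.play_routine(kens_quarters)
--         kens_quarters = second.play_routine(kens_quarters)
--         kens_quarters = third.play_routine(kens_quarters)
--
--     return first.total_plays + second.total_plays + third.total_plays
-- ===== SOURCE B (Python) =====
-- def class_calculate_plays(num_quarters):
--     # Fast-forward: from an aligned start (all counters 0) with q >= 16201,
--     # 5400 loop rounds always complete, net -4775 quarters and +16200 plays.
--     q = num_quarters
--     total = 0
--     if q >= 16201:
--         k = (q - 16201) // 4775 + 1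
--         total = k * 16200
--         q = q - k * 4775
--     p1 = p2 = p3 = 0
--     while q > 0:
--         q -= 1
--         total += 1
--         p1 += 1
--         if p1 == 27:
--             p1 = 0
--             q += 20
--         if q > 0:
--             q -= 1
--             total += 1
--             p2 += 1
--             if p2 == 100:
--                 p2 = 0
--                 q += 50
--         if q > 0:
--             q -= 1
--             total += 1
--             p3 += 1
--             if p3 == 8:
--                 p3 = 0
--                 q += 7
--     return total
-- ===== Notes on version B (the rewrite author's own statement) =====
-- stated objective: faster
-- what changed: B replaces the play-by-play O(N) simulation with one floor division that fast-forwards whole 5400-round cycles (each costing a net 4775 quarters and yielding 16200 plays from the aligned start state) and then simulates only a bounded tail of at most ~16200 quarters.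
import Mathlib
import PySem

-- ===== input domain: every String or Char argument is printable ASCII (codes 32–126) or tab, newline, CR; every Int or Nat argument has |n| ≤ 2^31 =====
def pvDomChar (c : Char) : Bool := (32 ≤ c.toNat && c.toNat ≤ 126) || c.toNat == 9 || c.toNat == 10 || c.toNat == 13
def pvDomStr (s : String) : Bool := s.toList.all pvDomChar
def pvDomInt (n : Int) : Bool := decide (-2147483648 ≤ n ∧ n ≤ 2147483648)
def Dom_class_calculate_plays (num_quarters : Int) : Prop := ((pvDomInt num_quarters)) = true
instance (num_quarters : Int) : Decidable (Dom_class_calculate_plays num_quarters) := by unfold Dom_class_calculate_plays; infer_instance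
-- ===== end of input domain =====

-- B replaces the O(N) play-by-play simulation by a single division that fast-forwards
-- whole 5400-round cycles (net -4775 quarters, +16200 plays each) and simulates only a
-- bounded tail; objective: faster.
-- Both while loops are ported with a fuel parameter as a totality guard; the entry fuel
-- (a potential that strictly drops each round) is proved sufficient, so fuel never runs out.

-- ===== PORT A =====
-- state of A's loop: quarters plus (plays, total_plays) of the three machines
structure SA where
  q : Int
  p1 : Int
  t1 : Int
  p2 : Int
  t2 : Int
  p3 : Int
  t3 : Int
deriving DecidableEq, Repr

-- SlotMachine.play_routine on machine state (plays, total_plays) with constants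
-- (payout, payout_ammount); returns (plays', total_plays', quarters')
def playRoutine (plays total_plays payout payout_ammount quarters : Int) : Int × Int × Int :=
  if quarters > 0 then
    let quarters := quarters - 1
    let plays := plays + 1
    let total_plays := total_plays + 1
    if plays = payout then (0, total_plays, quarters + payout_ammount)
    else (plays, total_plays, quarters)
  else (plays, total_plays, quarters)

-- one iteration of A's while loop: three play_routine calls on the three machines
def bodyA (s : SA) : SA :=
  let r1 := playRoutine s.p1 s.t1 27 20 s.q
  let r2 := playRoutine s.p2 s.t2 100 50 r1.2.2
  let r3 := playRoutine s.p3 s.t3 8 7 r2.2.2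
  ⟨r3.2.2, r1.1, r1.2.1, r2.1, r2.2.1, r3.1, r3.2.1⟩

-- fuel bound for A's loop (strictly decreasing potential; fuel exhaustion is unreachable)
def muA (s : SA) : Nat :=
  5400 * s.q.toNat + 3947 * s.p1.toNat + 2673 * s.p2.toNat + 4629 * s.p3.toNat

-- A's while loop (fuel is only a totality guard; the 0 case returns the loop's exit value)
def loopA : Nat → SA → Int
  | 0, s => s.t1 + s.t2 + s.t3
  | fuel + 1, s => if s.q > 0 then loopA fuel (bodyA s) else s.t1 + s.t2 + s.t3

def class_calculate_plays (num_quarters : Int) : Int :=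
  loopA (muA ⟨num_quarters, 0, 0, 0, 0, 0, 0⟩ + 1) ⟨num_quarters, 0, 0, 0, 0, 0, 0⟩

-- ===== PORT B =====
-- one iteration of the while loop of Source B's tail simulation (straight-line body)
def stepB (q p1 p2 p3 total : Int) : Int × Int × Int × Int × Int :=
  let q := q - 1
  let total := total + 1
  let p1 := p1 + 1
  let r1 : Int × Int := if p1 = 27 then (0, q + 20) else (p1, q)
  let p1 := r1.1
  let q := r1.2
  if q > 0 then
    let q := q - 1
    let total := total + 1
    let p2 := p2 + 1
    let r2 : Int × Int := if p2 = 100 then (0, q + 50) else (p2, q)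
    let p2 := r2.1
    let q := r2.2
    if q > 0 then
      let q := q - 1
      let total := total + 1
      let p3 := p3 + 1
      let r3 : Int × Int := if p3 = 8 then (0, q + 7) else (p3, q)
      (r3.2, p1, p2, r3.1, total)
    else (q, p1, p2, p3, total)
  else (q, p1, p2, p3, total)

-- fuel bound for B's tail loop (another strictly decreasing potential)
def muB (q p1 p2 p3 : Int) : Nat :=
  50 * q.toNat + 37 * p1.toNat + 25 * p2.toNat + 43 * p3.toNat

-- B's tail while loop (fuel is only a totality guard)
def tailB : Nat → Int × Int × Int × Int × Int → Int
  | 0, (_, _, _, _, total) => total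
  | fuel + 1, (q, p1, p2, p3, total) =>
      if q > 0 then tailB fuel (stepB q p1 p2 p3 total) else total

def class_calculate_plays_alt (num_quarters : Int) : Int :=
  if num_quarters ≥ 16201 then
    let k := PySem.Int.floordiv (num_quarters - 16201) 4775 + 1
    tailB (muB (num_quarters - k * 4775) 0 0 0 + 1)
      (num_quarters - k * 4775, 0, 0, 0, k * 16200)
  else tailB (muB num_quarters 0 0 0 + 1) (num_quarters, 0, 0, 0, 0)

-- ===== PRECONDITION & SPEC =====
def Spec_class_calculate_plays (num_quarters : Int) (out : Int) : Prop := out = class_calculate_plays_alt num_quarters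
instance (num_quarters : Int) (out : Int) : Decidable (Spec_class_calculate_plays num_quarters out) := by unfold Spec_class_calculate_plays; infer_instance

-- ===== CLAIM (what is proved, stated in full; the proofs are below) =====
def Claim_equal_class_calculate_plays : Prop := ∀ (num_quarters : Int), Dom_class_calculate_plays num_quarters → Spec_class_calculate_plays num_quarters (class_calculate_plays num_quarters)

-- ===== LEMMAS AND PROOFS =====

-- B's potential strictly drops on each executed round
theorem muB_decr (q p1 p2 p3 total : Int) (h : q > 0) :
    muB (stepB q p1 p2 p3 total).1 (stepB q p1 p2 p3 total).2.1
        (stepB q p1 p2 p3 total).2.2.1 (stepB q p1 p2 p3 total).2.2.2.1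
      < muB q p1 p2 p3 := by
  simp only [stepB, muB]
  split_ifs <;> simp_all <;> omega

-- fuel irrelevance for tailB: with sufficient fuel the result does not depend on it
theorem tailB_fuel (f1 : Nat) : ∀ (f2 : Nat) (q p1 p2 p3 t : Int),
    muB q p1 p2 p3 < f1 → muB q p1 p2 p3 < f2 →
    tailB f1 (q, p1, p2, p3, t) = tailB f2 (q, p1, p2, p3, t) := by
  induction f1 with
  | zero => intro f2 q p1 p2 p3 t h1 _; omega
  | succ f1 ih =>
      intro f2 q p1 p2 p3 t h1 h2
      match f2, h2 with
      | f2 + 1, h2 =>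
        simp only [tailB]
        by_cases hq : q > 0
        · simp only [hq, if_pos]
          have hd := muB_decr q p1 p2 p3 t hq
          have := ih f2 (stepB q p1 p2 p3 t).1 (stepB q p1 p2 p3 t).2.1
            (stepB q p1 p2 p3 t).2.2.1 (stepB q p1 p2 p3 t).2.2.2.1
            (stepB q p1 p2 p3 t).2.2.2.2 (by omega) (by omega)
          simpa using this
        · simp [hq]

-- bisimulation: with the SAME fuel, A's loop equals B's tail loop with the totals summed
theorem stepB_bodyA (q p1 t1 p2 t2 p3 t3 : Int) (h : q > 0) :
    stepB q p1 p2 p3 (t1 + t2 + t3) =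
      ((bodyA ⟨q, p1, t1, p2, t2, p3, t3⟩).q, (bodyA ⟨q, p1, t1, p2, t2, p3, t3⟩).p1,
       (bodyA ⟨q, p1, t1, p2, t2, p3, t3⟩).p2, (bodyA ⟨q, p1, t1, p2, t2, p3, t3⟩).p3,
       (bodyA ⟨q, p1, t1, p2, t2, p3, t3⟩).t1 + (bodyA ⟨q, p1, t1, p2, t2, p3, t3⟩).t2
         + (bodyA ⟨q, p1, t1, p2, t2, p3, t3⟩).t3) := by
  simp only [stepB, bodyA, playRoutine]
  split_ifs <;> simp_all <;> omega

theorem loopA_eq_tailB (f : Nat) : ∀ (q p1 t1 p2 t2 p3 t3 : Int),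
    loopA f ⟨q, p1, t1, p2, t2, p3, t3⟩ = tailB f (q, p1, p2, p3, t1 + t2 + t3) := by
  induction f with
  | zero => intro q p1 t1 p2 t2 p3 t3; rfl
  | succ f ih =>
      intro q p1 t1 p2 t2 p3 t3
      simp only [loopA, tailB]
      by_cases h : q > 0
      · simp only [h, if_pos, stepB_bodyA q p1 t1 p2 t2 p3 t3 h]
        exact ih _ _ _ _ _ _ _
      · simp [h]

-- the total argument is a pure accumulator
theorem stepB_shift_total (q p1 p2 p3 t c : Int) :
    stepB q p1 p2 p3 (t + c) =
      ((stepB q p1 p2 p3 t).1, (stepB q p1 p2 p3 t).2.1, (stepB q p1 p2 p3 t).2.2.1,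
       (stepB q p1 p2 p3 t).2.2.2.1, (stepB q p1 p2 p3 t).2.2.2.2 + c) := by
  simp only [stepB]
  split_ifs <;> simp_all <;> omega

theorem tailB_shift_total (f : Nat) : ∀ (q p1 p2 p3 t c : Int),
    tailB f (q, p1, p2, p3, t + c) = tailB f (q, p1, p2, p3, t) + c := by
  induction f with
  | zero => intro q p1 p2 p3 t c; rfl
  | succ f ih =>
      intro q p1 p2 p3 t c
      simp only [tailB]
      by_cases h : q > 0
      · simp only [h, if_pos, stepB_shift_total]
        simpa using ih (stepB q p1 p2 p3 t).1 (stepB q p1 p2 p3 t).2.1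
          (stepB q p1 p2 p3 t).2.2.1 (stepB q p1 p2 p3 t).2.2.2.1
          (stepB q p1 p2 p3 t).2.2.2.2 c
      · simp [h]

-- guard: all three plays of one round find a positive quarter count
def gB (q p1 p2 : Int) : Bool :=
  let q1 : Int := if p1 + 1 = 27 then q - 1 + 20 else q - 1
  let q2 : Int := if p2 + 1 = 100 then q1 - 1 + 50 else q1 - 1
  decide (q > 0) && decide (q1 > 0) && decide (q2 > 0)

def okN : Nat → Int × Int × Int × Int × Int → Bool
  | 0, _ => true
  | n + 1, (q, p1, p2, p3, t) =>
      gB q p1 p2 && okN n (stepB q p1 p2 p3 t)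

def iterN : Nat → Int × Int × Int × Int × Int → Int × Int × Int × Int × Int
  | 0, s => s
  | n + 1, (q, p1, p2, p3, t) => iterN n (stepB q p1 p2 p3 t)

-- under the guard, adding c ≥ 0 quarters shifts one round uniformly
theorem stepB_shift_q (q p1 p2 p3 t c : Int) (hc : 0 ≤ c) (hg : gB q p1 p2 = true) :
    stepB (q + c) p1 p2 p3 t =
      ((stepB q p1 p2 p3 t).1 + c, (stepB q p1 p2 p3 t).2.1, (stepB q p1 p2 p3 t).2.2.1,
       (stepB q p1 p2 p3 t).2.2.2.1, (stepB q p1 p2 p3 t).2.2.2.2) := by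
  simp only [stepB, gB, Bool.and_eq_true, decide_eq_true_eq] at *
  split_ifs at * <;> simp_all <;> omega

-- n guarded rounds consume exactly n units of fuel and shift uniformly
theorem tailB_shift_q (n : Nat) :
    ∀ (f : Nat) (q p1 p2 p3 t c : Int), 0 ≤ c → okN n (q, p1, p2, p3, t) = true →
      tailB (n + f) (q + c, p1, p2, p3, t) =
        tailB f ((iterN n (q, p1, p2, p3, t)).1 + c, (iterN n (q, p1, p2, p3, t)).2.1,
          (iterN n (q, p1, p2, p3, t)).2.2.1, (iterN n (q, p1, p2, p3, t)).2.2.2.1,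
          (iterN n (q, p1, p2, p3, t)).2.2.2.2) := by
  induction n with
  | zero => intro f q p1 p2 p3 t c hc _; simp [iterN]
  | succ n ih =>
      intro f q p1 p2 p3 t c hc hok
      simp only [okN, Bool.and_eq_true] at hok
      obtain ⟨hg, hok'⟩ := hok
      have hq : q > 0 := by
        simp only [gB, Bool.and_eq_true, decide_eq_true_eq] at hg; exact hg.1.1
      have hn : n + 1 + f = (n + f) + 1 := by omega
      rw [hn]
      simp only [tailB]
      simp only [show q + c > 0 by omega, if_pos]
      rw [stepB_shift_q q p1 p2 p3 t c hc hg]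
      have := ih f (stepB q p1 p2 p3 t).1 (stepB q p1 p2 p3 t).2.1 (stepB q p1 p2 p3 t).2.2.1
        (stepB q p1 p2 p3 t).2.2.2.1 (stepB q p1 p2 p3 t).2.2.2.2 c hc (by simpa using hok')
      simp only [iterN]
      simpa using this

-- the concrete 5400-round cycle facts, evaluated by the kernel in 100-step chunks
theorem iterN_add (m n : Nat) : ∀ s : Int × Int × Int × Int × Int,
    iterN (m + n) s = iterN n (iterN m s) := by
  induction m with
  | zero => intro s; simp [iterN]
  | succ m ih =>
      intro s
      obtain ⟨q, p1, p2, p3, t⟩ := s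
      have : m + 1 + n = (m + n) + 1 := by omega
      rw [this]
      simp only [iterN]
      exact ih (stepB q p1 p2 p3 t)

theorem okN_add (m n : Nat) : ∀ s : Int × Int × Int × Int × Int,
    okN (m + n) s = (okN m s && okN n (iterN m s)) := by
  induction m with
  | zero => intro s; simp [okN, iterN]
  | succ m ih =>
      intro s
      obtain ⟨q, p1, p2, p3, t⟩ := s
      have : m + 1 + n = (m + n) + 1 := by omega
      rw [this]
      simp only [okN, iterN, ih (stepB q p1 p2 p3 t), Bool.and_assoc]

theorem iter_chunk (n : Nat) (s s1 : Int × Int × Int × Int × Int)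
    (h : iterN 100 s = s1) (k : Nat) (hk : 100 + n = k) : iterN k s = iterN n s1 := by
  subst hk; rw [iterN_add 100 n s, h]

theorem ok_chunk (n : Nat) (s s1 : Int × Int × Int × Int × Int)
    (h1 : okN 100 s = true) (h : iterN 100 s = s1) (k : Nat) (hk : 100 + n = k) :
    okN k s = okN n s1 := by
  subst hk; rw [okN_add 100 n s, h1, h, Bool.true_and]

set_option maxRecDepth 40000 in
theorem cycle_ok : okN 5400 (16201, 0, 0, 0, 0) = true := by
  calc okN 5400 ((16201, 0, 0, 0, 0) : Int × Int × Int × Int × Int) = okN 5300 ((16095, 19, 0, 4, 300) : Int × Int × Int × Int × Int) := ok_chunk 5300 _ _ (by decide) (by decide) 5400 rfl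
    _ = okN 5200 ((16016, 11, 0, 0, 600) : Int × Int × Int × Int × Int) := ok_chunk 5200 _ _ (by decide) (by decide) 5300 rfl
    _ = okN 5100 ((15930, 3, 0, 4, 900) : Int × Int × Int × Int × Int) := ok_chunk 5100 _ _ (by decide) (by decide) 5200 rfl
    _ = okN 5000 ((15831, 22, 0, 0, 1200) : Int × Int × Int × Int × Int) := ok_chunk 5000 _ _ (by decide) (by decide) 5100 rfl
    _ = okN 4900 ((15745, 14, 0, 4, 1500) : Int × Int × Int × Int × Int) := ok_chunk 4900 _ _ (by decide) (by decide) 5000 rfl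
    _ = okN 4800 ((15666, 6, 0, 0, 1800) : Int × Int × Int × Int × Int) := ok_chunk 4800 _ _ (by decide) (by decide) 4900 rfl
    _ = okN 4700 ((15560, 25, 0, 4, 2100) : Int × Int × Int × Int × Int) := ok_chunk 4700 _ _ (by decide) (by decide) 4800 rfl
    _ = okN 4600 ((15481, 17, 0, 0, 2400) : Int × Int × Int × Int × Int) := ok_chunk 4600 _ _ (by decide) (by decide) 4700 rfl
    _ = okN 4500 ((15395, 9, 0, 4, 2700) : Int × Int × Int × Int × Int) := ok_chunk 4500 _ _ (by decide) (by decide) 4600 rfl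
    _ = okN 4400 ((15316, 1, 0, 0, 3000) : Int × Int × Int × Int × Int) := ok_chunk 4400 _ _ (by decide) (by decide) 4500 rfl
    _ = okN 4300 ((15210, 20, 0, 4, 3300) : Int × Int × Int × Int × Int) := ok_chunk 4300 _ _ (by decide) (by decide) 4400 rfl
    _ = okN 4200 ((15131, 12, 0, 0, 3600) : Int × Int × Int × Int × Int) := ok_chunk 4200 _ _ (by decide) (by decide) 4300 rfl
    _ = okN 4100 ((15045, 4, 0, 4, 3900) : Int × Int × Int × Int × Int) := ok_chunk 4100 _ _ (by decide) (by decide) 4200 rfl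
    _ = okN 4000 ((14946, 23, 0, 0, 4200) : Int × Int × Int × Int × Int) := ok_chunk 4000 _ _ (by decide) (by decide) 4100 rfl
    _ = okN 3900 ((14860, 15, 0, 4, 4500) : Int × Int × Int × Int × Int) := ok_chunk 3900 _ _ (by decide) (by decide) 4000 rfl
    _ = okN 3800 ((14781, 7, 0, 0, 4800) : Int × Int × Int × Int × Int) := ok_chunk 3800 _ _ (by decide) (by decide) 3900 rfl
    _ = okN 3700 ((14675, 26, 0, 4, 5100) : Int × Int × Int × Int × Int) := ok_chunk 3700 _ _ (by decide) (by decide) 3800 rfl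
    _ = okN 3600 ((14596, 18, 0, 0, 5400) : Int × Int × Int × Int × Int) := ok_chunk 3600 _ _ (by decide) (by decide) 3700 rfl
    _ = okN 3500 ((14510, 10, 0, 4, 5700) : Int × Int × Int × Int × Int) := ok_chunk 3500 _ _ (by decide) (by decide) 3600 rfl
    _ = okN 3400 ((14431, 2, 0, 0, 6000) : Int × Int × Int × Int × Int) := ok_chunk 3400 _ _ (by decide) (by decide) 3500 rfl
    _ = okN 3300 ((14325, 21, 0, 4, 6300) : Int × Int × Int × Int × Int) := ok_chunk 3300 _ _ (by decide) (by decide) 3400 rfl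
    _ = okN 3200 ((14246, 13, 0, 0, 6600) : Int × Int × Int × Int × Int) := ok_chunk 3200 _ _ (by decide) (by decide) 3300 rfl
    _ = okN 3100 ((14160, 5, 0, 4, 6900) : Int × Int × Int × Int × Int) := ok_chunk 3100 _ _ (by decide) (by decide) 3200 rfl
    _ = okN 3000 ((14061, 24, 0, 0, 7200) : Int × Int × Int × Int × Int) := ok_chunk 3000 _ _ (by decide) (by decide) 3100 rfl
    _ = okN 2900 ((13975, 16, 0, 4, 7500) : Int × Int × Int × Int × Int) := ok_chunk 2900 _ _ (by decide) (by decide) 3000 rfl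
    _ = okN 2800 ((13896, 8, 0, 0, 7800) : Int × Int × Int × Int × Int) := ok_chunk 2800 _ _ (by decide) (by decide) 2900 rfl
    _ = okN 2700 ((13810, 0, 0, 4, 8100) : Int × Int × Int × Int × Int) := ok_chunk 2700 _ _ (by decide) (by decide) 2800 rfl
    _ = okN 2600 ((13711, 19, 0, 0, 8400) : Int × Int × Int × Int × Int) := ok_chunk 2600 _ _ (by decide) (by decide) 2700 rfl
    _ = okN 2500 ((13625, 11, 0, 4, 8700) : Int × Int × Int × Int × Int) := ok_chunk 2500 _ _ (by decide) (by decide) 2600 rfl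
    _ = okN 2400 ((13546, 3, 0, 0, 9000) : Int × Int × Int × Int × Int) := ok_chunk 2400 _ _ (by decide) (by decide) 2500 rfl
    _ = okN 2300 ((13440, 22, 0, 4, 9300) : Int × Int × Int × Int × Int) := ok_chunk 2300 _ _ (by decide) (by decide) 2400 rfl
    _ = okN 2200 ((13361, 14, 0, 0, 9600) : Int × Int × Int × Int × Int) := ok_chunk 2200 _ _ (by decide) (by decide) 2300 rfl
    _ = okN 2100 ((13275, 6, 0, 4, 9900) : Int × Int × Int × Int × Int) := ok_chunk 2100 _ _ (by decide) (by decide) 2200 rfl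
    _ = okN 2000 ((13176, 25, 0, 0, 10200) : Int × Int × Int × Int × Int) := ok_chunk 2000 _ _ (by decide) (by decide) 2100 rfl
    _ = okN 1900 ((13090, 17, 0, 4, 10500) : Int × Int × Int × Int × Int) := ok_chunk 1900 _ _ (by decide) (by decide) 2000 rfl
    _ = okN 1800 ((13011, 9, 0, 0, 10800) : Int × Int × Int × Int × Int) := ok_chunk 1800 _ _ (by decide) (by decide) 1900 rfl
    _ = okN 1700 ((12925, 1, 0, 4, 11100) : Int × Int × Int × Int × Int) := ok_chunk 1700 _ _ (by decide) (by decide) 1800 rfl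
    _ = okN 1600 ((12826, 20, 0, 0, 11400) : Int × Int × Int × Int × Int) := ok_chunk 1600 _ _ (by decide) (by decide) 1700 rfl
    _ = okN 1500 ((12740, 12, 0, 4, 11700) : Int × Int × Int × Int × Int) := ok_chunk 1500 _ _ (by decide) (by decide) 1600 rfl
    _ = okN 1400 ((12661, 4, 0, 0, 12000) : Int × Int × Int × Int × Int) := ok_chunk 1400 _ _ (by decide) (by decide) 1500 rfl
    _ = okN 1300 ((12555, 23, 0, 4, 12300) : Int × Int × Int × Int × Int) := ok_chunk 1300 _ _ (by decide) (by decide) 1400 rfl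
    _ = okN 1200 ((12476, 15, 0, 0, 12600) : Int × Int × Int × Int × Int) := ok_chunk 1200 _ _ (by decide) (by decide) 1300 rfl
    _ = okN 1100 ((12390, 7, 0, 4, 12900) : Int × Int × Int × Int × Int) := ok_chunk 1100 _ _ (by decide) (by decide) 1200 rfl
    _ = okN 1000 ((12291, 26, 0, 0, 13200) : Int × Int × Int × Int × Int) := ok_chunk 1000 _ _ (by decide) (by decide) 1100 rfl
    _ = okN 900 ((12205, 18, 0, 4, 13500) : Int × Int × Int × Int × Int) := ok_chunk 900 _ _ (by decide) (by decide) 1000 rfl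
    _ = okN 800 ((12126, 10, 0, 0, 13800) : Int × Int × Int × Int × Int) := ok_chunk 800 _ _ (by decide) (by decide) 900 rfl
    _ = okN 700 ((12040, 2, 0, 4, 14100) : Int × Int × Int × Int × Int) := ok_chunk 700 _ _ (by decide) (by decide) 800 rfl
    _ = okN 600 ((11941, 21, 0, 0, 14400) : Int × Int × Int × Int × Int) := ok_chunk 600 _ _ (by decide) (by decide) 700 rfl
    _ = okN 500 ((11855, 13, 0, 4, 14700) : Int × Int × Int × Int × Int) := ok_chunk 500 _ _ (by decide) (by decide) 600 rfl
    _ = okN 400 ((11776, 5, 0, 0, 15000) : Int × Int × Int × Int × Int) := ok_chunk 400 _ _ (by decide) (by decide) 500 rfl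
    _ = okN 300 ((11670, 24, 0, 4, 15300) : Int × Int × Int × Int × Int) := ok_chunk 300 _ _ (by decide) (by decide) 400 rfl
    _ = okN 200 ((11591, 16, 0, 0, 15600) : Int × Int × Int × Int × Int) := ok_chunk 200 _ _ (by decide) (by decide) 300 rfl
    _ = okN 100 ((11505, 8, 0, 4, 15900) : Int × Int × Int × Int × Int) := ok_chunk 100 _ _ (by decide) (by decide) 200 rfl
    _ = okN 0 ((11426, 0, 0, 0, 16200) : Int × Int × Int × Int × Int) := ok_chunk 0 _ _ (by decide) (by decide) 100 rfl
    _ = true := rfl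

set_option maxRecDepth 40000 in
theorem cycle_iter : iterN 5400 (16201, 0, 0, 0, 0) = (11426, 0, 0, 0, 16200) := by
  calc iterN 5400 ((16201, 0, 0, 0, 0) : Int × Int × Int × Int × Int) = iterN 5300 ((16095, 19, 0, 4, 300) : Int × Int × Int × Int × Int) := iter_chunk 5300 _ _ (by decide) 5400 rfl
    _ = iterN 5200 ((16016, 11, 0, 0, 600) : Int × Int × Int × Int × Int) := iter_chunk 5200 _ _ (by decide) 5300 rfl
    _ = iterN 5100 ((15930, 3, 0, 4, 900) : Int × Int × Int × Int × Int) := iter_chunk 5100 _ _ (by decide) 5200 rfl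
    _ = iterN 5000 ((15831, 22, 0, 0, 1200) : Int × Int × Int × Int × Int) := iter_chunk 5000 _ _ (by decide) 5100 rfl
    _ = iterN 4900 ((15745, 14, 0, 4, 1500) : Int × Int × Int × Int × Int) := iter_chunk 4900 _ _ (by decide) 5000 rfl
    _ = iterN 4800 ((15666, 6, 0, 0, 1800) : Int × Int × Int × Int × Int) := iter_chunk 4800 _ _ (by decide) 4900 rfl
    _ = iterN 4700 ((15560, 25, 0, 4, 2100) : Int × Int × Int × Int × Int) := iter_chunk 4700 _ _ (by decide) 4800 rfl
    _ = iterN 4600 ((15481, 17, 0, 0, 2400) : Int × Int × Int × Int × Int) := iter_chunk 4600 _ _ (by decide) 4700 rfl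
    _ = iterN 4500 ((15395, 9, 0, 4, 2700) : Int × Int × Int × Int × Int) := iter_chunk 4500 _ _ (by decide) 4600 rfl
    _ = iterN 4400 ((15316, 1, 0, 0, 3000) : Int × Int × Int × Int × Int) := iter_chunk 4400 _ _ (by decide) 4500 rfl
    _ = iterN 4300 ((15210, 20, 0, 4, 3300) : Int × Int × Int × Int × Int) := iter_chunk 4300 _ _ (by decide) 4400 rfl
    _ = iterN 4200 ((15131, 12, 0, 0, 3600) : Int × Int × Int × Int × Int) := iter_chunk 4200 _ _ (by decide) 4300 rfl
    _ = iterN 4100 ((15045, 4, 0, 4, 3900) : Int × Int × Int × Int × Int) := iter_chunk 4100 _ _ (by decide) 4200 rfl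
    _ = iterN 4000 ((14946, 23, 0, 0, 4200) : Int × Int × Int × Int × Int) := iter_chunk 4000 _ _ (by decide) 4100 rfl
    _ = iterN 3900 ((14860, 15, 0, 4, 4500) : Int × Int × Int × Int × Int) := iter_chunk 3900 _ _ (by decide) 4000 rfl
    _ = iterN 3800 ((14781, 7, 0, 0, 4800) : Int × Int × Int × Int × Int) := iter_chunk 3800 _ _ (by decide) 3900 rfl
    _ = iterN 3700 ((14675, 26, 0, 4, 5100) : Int × Int × Int × Int × Int) := iter_chunk 3700 _ _ (by decide) 3800 rfl
    _ = iterN 3600 ((14596, 18, 0, 0, 5400) : Int × Int × Int × Int × Int) := iter_chunk 3600 _ _ (by decide) 3700 rfl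
    _ = iterN 3500 ((14510, 10, 0, 4, 5700) : Int × Int × Int × Int × Int) := iter_chunk 3500 _ _ (by decide) 3600 rfl
    _ = iterN 3400 ((14431, 2, 0, 0, 6000) : Int × Int × Int × Int × Int) := iter_chunk 3400 _ _ (by decide) 3500 rfl
    _ = iterN 3300 ((14325, 21, 0, 4, 6300) : Int × Int × Int × Int × Int) := iter_chunk 3300 _ _ (by decide) 3400 rfl
    _ = iterN 3200 ((14246, 13, 0, 0, 6600) : Int × Int × Int × Int × Int) := iter_chunk 3200 _ _ (by decide) 3300 rfl
    _ = iterN 3100 ((14160, 5, 0, 4, 6900) : Int × Int × Int × Int × Int) := iter_chunk 3100 _ _ (by decide) 3200 rfl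
    _ = iterN 3000 ((14061, 24, 0, 0, 7200) : Int × Int × Int × Int × Int) := iter_chunk 3000 _ _ (by decide) 3100 rfl
    _ = iterN 2900 ((13975, 16, 0, 4, 7500) : Int × Int × Int × Int × Int) := iter_chunk 2900 _ _ (by decide) 3000 rfl
    _ = iterN 2800 ((13896, 8, 0, 0, 7800) : Int × Int × Int × Int × Int) := iter_chunk 2800 _ _ (by decide) 2900 rfl
    _ = iterN 2700 ((13810, 0, 0, 4, 8100) : Int × Int × Int × Int × Int) := iter_chunk 2700 _ _ (by decide) 2800 rfl
    _ = iterN 2600 ((13711, 19, 0, 0, 8400) : Int × Int × Int × Int × Int) := iter_chunk 2600 _ _ (by decide) 2700 rfl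
    _ = iterN 2500 ((13625, 11, 0, 4, 8700) : Int × Int × Int × Int × Int) := iter_chunk 2500 _ _ (by decide) 2600 rfl
    _ = iterN 2400 ((13546, 3, 0, 0, 9000) : Int × Int × Int × Int × Int) := iter_chunk 2400 _ _ (by decide) 2500 rfl
    _ = iterN 2300 ((13440, 22, 0, 4, 9300) : Int × Int × Int × Int × Int) := iter_chunk 2300 _ _ (by decide) 2400 rfl
    _ = iterN 2200 ((13361, 14, 0, 0, 9600) : Int × Int × Int × Int × Int) := iter_chunk 2200 _ _ (by decide) 2300 rfl
    _ = iterN 2100 ((13275, 6, 0, 4, 9900) : Int × Int × Int × Int × Int) := iter_chunk 2100 _ _ (by decide) 2200 rfl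
    _ = iterN 2000 ((13176, 25, 0, 0, 10200) : Int × Int × Int × Int × Int) := iter_chunk 2000 _ _ (by decide) 2100 rfl
    _ = iterN 1900 ((13090, 17, 0, 4, 10500) : Int × Int × Int × Int × Int) := iter_chunk 1900 _ _ (by decide) 2000 rfl
    _ = iterN 1800 ((13011, 9, 0, 0, 10800) : Int × Int × Int × Int × Int) := iter_chunk 1800 _ _ (by decide) 1900 rfl
    _ = iterN 1700 ((12925, 1, 0, 4, 11100) : Int × Int × Int × Int × Int) := iter_chunk 1700 _ _ (by decide) 1800 rfl
    _ = iterN 1600 ((12826, 20, 0, 0, 11400) : Int × Int × Int × Int × Int) := iter_chunk 1600 _ _ (by decide) 1700 rfl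
    _ = iterN 1500 ((12740, 12, 0, 4, 11700) : Int × Int × Int × Int × Int) := iter_chunk 1500 _ _ (by decide) 1600 rfl
    _ = iterN 1400 ((12661, 4, 0, 0, 12000) : Int × Int × Int × Int × Int) := iter_chunk 1400 _ _ (by decide) 1500 rfl
    _ = iterN 1300 ((12555, 23, 0, 4, 12300) : Int × Int × Int × Int × Int) := iter_chunk 1300 _ _ (by decide) 1400 rfl
    _ = iterN 1200 ((12476, 15, 0, 0, 12600) : Int × Int × Int × Int × Int) := iter_chunk 1200 _ _ (by decide) 1300 rfl
    _ = iterN 1100 ((12390, 7, 0, 4, 12900) : Int × Int × Int × Int × Int) := iter_chunk 1100 _ _ (by decide) 1200 rfl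
    _ = iterN 1000 ((12291, 26, 0, 0, 13200) : Int × Int × Int × Int × Int) := iter_chunk 1000 _ _ (by decide) 1100 rfl
    _ = iterN 900 ((12205, 18, 0, 4, 13500) : Int × Int × Int × Int × Int) := iter_chunk 900 _ _ (by decide) 1000 rfl
    _ = iterN 800 ((12126, 10, 0, 0, 13800) : Int × Int × Int × Int × Int) := iter_chunk 800 _ _ (by decide) 900 rfl
    _ = iterN 700 ((12040, 2, 0, 4, 14100) : Int × Int × Int × Int × Int) := iter_chunk 700 _ _ (by decide) 800 rfl
    _ = iterN 600 ((11941, 21, 0, 0, 14400) : Int × Int × Int × Int × Int) := iter_chunk 600 _ _ (by decide) 700 rfl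
    _ = iterN 500 ((11855, 13, 0, 4, 14700) : Int × Int × Int × Int × Int) := iter_chunk 500 _ _ (by decide) 600 rfl
    _ = iterN 400 ((11776, 5, 0, 0, 15000) : Int × Int × Int × Int × Int) := iter_chunk 400 _ _ (by decide) 500 rfl
    _ = iterN 300 ((11670, 24, 0, 4, 15300) : Int × Int × Int × Int × Int) := iter_chunk 300 _ _ (by decide) 400 rfl
    _ = iterN 200 ((11591, 16, 0, 0, 15600) : Int × Int × Int × Int × Int) := iter_chunk 200 _ _ (by decide) 300 rfl
    _ = iterN 100 ((11505, 8, 0, 4, 15900) : Int × Int × Int × Int × Int) := iter_chunk 100 _ _ (by decide) 200 rfl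
    _ = iterN 0 ((11426, 0, 0, 0, 16200) : Int × Int × Int × Int × Int) := iter_chunk 0 _ _ (by decide) 100 rfl
    _ = ((11426, 0, 0, 0, 16200) : Int × Int × Int × Int × Int) := rfl

-- canonical sufficient-fuel value of B's tail loop
def tbv (s : Int × Int × Int × Int × Int) : Int :=
  tailB (muB s.1 s.2.1 s.2.2.1 s.2.2.2.1 + 1) s

theorem tailB_tbv (f : Nat) (q p1 p2 p3 t : Int) (h : muB q p1 p2 p3 < f) :
    tailB f (q, p1, p2, p3, t) = tbv (q, p1, p2, p3, t) :=
  tailB_fuel f (muB q p1 p2 p3 + 1) q p1 p2 p3 t h (by omega)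

-- one full cycle from an aligned state: 16200 plays, 4775 quarters lost
theorem tbv_cycle (q : Int) (h : 16201 ≤ q) :
    tbv (q, 0, 0, 0, 0) = 16200 + tbv (q - 4775, 0, 0, 0, 0) := by
  have hc : (0 : Int) ≤ q - 16201 := by omega
  have hmu : muB q 0 0 0 + 1 = 5400 + (muB q 0 0 0 + 1 - 5400) := by
    simp only [muB]; omega
  have hsh := tailB_shift_q 5400 (muB q 0 0 0 + 1 - 5400) 16201 0 0 0 0 (q - 16201) hc cycle_ok
  rw [cycle_iter] at hsh
  simp only [show (16201 : Int) + (q - 16201) = q by ring] at hsh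
  have h1 : tailB (muB q 0 0 0 + 1) (q, 0, 0, 0, 0)
      = tailB (muB q 0 0 0 + 1 - 5400) (q - 4775, 0, 0, 0, 16200) := by
    conv_lhs => rw [hmu]
    rw [hsh, show (11426 : Int) + (q - 16201) = q - 4775 by ring]
  have h2 : tailB (muB q 0 0 0 + 1 - 5400) ((q - 4775 : Int), 0, 0, 0, (0 : Int) + 16200)
      = tailB (muB q 0 0 0 + 1 - 5400) (q - 4775, 0, 0, 0, 0) + 16200 :=
    tailB_shift_total _ _ _ _ _ _ _
  rw [zero_add] at h2
  have h3 : tailB (muB q 0 0 0 + 1 - 5400) ((q - 4775 : Int), 0, 0, 0, (0 : Int))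
      = tbv ((q - 4775 : Int), 0, 0, 0, (0 : Int)) := by
    apply tailB_tbv
    simp only [muB]
    omega
  show tailB (muB q 0 0 0 + 1) (q, 0, 0, 0, 0) = _
  rw [h1, h2, h3]
  ring

-- k cycles at once (ediv form)
theorem tbv_cycles (m : Nat) : ∀ q : Int, q.toNat ≤ m → 16201 ≤ q →
    tbv (q, 0, 0, 0, 0) = ((q - 16201) / 4775 + 1) * 16200
      + tbv (q - ((q - 16201) / 4775 + 1) * 4775, 0, 0, 0, 0) := by
  induction m with
  | zero => intro q hm hq; omega
  | succ m ih =>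
      intro q hm hq
      by_cases h2 : q < 20976
      · have hk : (q - 16201) / 4775 = 0 := by omega
        rw [hk, tbv_cycle q hq]; ring_nf
      · have hq' : 16201 ≤ q - 4775 := by omega
        have := ih (q - 4775) (by omega) hq'
        rw [tbv_cycle q hq, this]
        have hk : (q - 16201) / 4775 = (q - 4775 - 16201) / 4775 + 1 := by omega
        rw [hk]; ring_nf

-- ===== VERDICT (by name: the statement is the Claim_ definition above) =====
theorem class_calculate_plays_spec : Claim_equal_class_calculate_plays := by
  intro n _
  show class_calculate_plays n = class_calculate_plays_alt n
  unfold class_calculate_plays class_calculate_plays_alt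
  rw [loopA_eq_tailB, show ((0 : Int) + 0 + 0) = 0 by norm_num]
  rw [tailB_tbv (muA ⟨n, 0, 0, 0, 0, 0, 0⟩ + 1) n 0 0 0 0 (by dsimp only [muA, muB]; omega)]
  by_cases h : n ≥ 16201
  · rw [if_pos h]
    simp only [PySem.Int.floordiv_eq_ediv_of_pos (show (0 : Int) < 4775 by norm_num)]
    rw [tbv_cycles n.toNat n le_rfl h]
    rw [tailB_tbv (muB (n - ((n - 16201) / 4775 + 1) * 4775) 0 0 0 + 1)
      (n - ((n - 16201) / 4775 + 1) * 4775) 0 0 0 (((n - 16201) / 4775 + 1) * 16200) (by omega)]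
    have h2 : tbv ((n - ((n - 16201) / 4775 + 1) * 4775 : Int), 0, 0, 0,
        (0 : Int) + ((n - 16201) / 4775 + 1) * 16200)
        = tbv ((n - ((n - 16201) / 4775 + 1) * 4775 : Int), 0, 0, 0, (0 : Int))
          + ((n - 16201) / 4775 + 1) * 16200 := by
      unfold tbv
      exact tailB_shift_total _ _ _ _ _ _ _
    rw [zero_add] at h2
    rw [h2]
    ring
  · rw [if_neg h]
    exact (tailB_tbv (muB n 0 0 0 + 1) n 0 0 0 0 (by omega)).symm
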